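-- pv_equiv track=rewrite | github.com/zeta1999/code-bert | code_bert/core/data_reader.py | divide_code_in_logical_lines
-- ===== SOURCE A (Python) =====
-- from tokenize import INDENT, DEDENT, ENCODING, ENDMARKER, STRING, NEWLINE, tokenize
--
-- spl_tokens = {INDENT: "__INDENT__",
--               DEDENT: "__DEDENT__",
--               ENCODING: None,
--               ENDMARKER: None,
--               NEWLINE: "__NEWLINE__"}
--
-- def divide_code_in_logical_lines(s):
--     logical_lines = []
--     substring_arr = []
--     next_token_is_indent = False
--     for idx, tok in enumerate(s):
--         if next_token_is_indent:
--             substring_arr.append(tok)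
--             res_str = " ".join(substring_arr)
--             # res_str = res_str.replace('"""', "")
--             res_str = res_str.rstrip().lstrip()
--             logical_lines.append(res_str)
--             substring_arr = []
--             next_token_is_indent = False
--             continue
--         if tok == spl_tokens[NEWLINE].lower():
--             if len(substring_arr) > 256:  # For the position embedding later
--                 substring_arr = substring_arr[:255]
--
--             if (idx+1) < len(s) and s[idx+1] == spl_tokens[INDENT].lower():
--                 next_token_is_indent = True
--                 continue
--             res_str = " ".join(substring_arr)
--             # res_str = res_str.replace('"""', "")
--             res_str = res_str.rstrip().lstrip()
--             logical_lines.append(res_str)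
--             substring_arr = []
--         else:
--             substring_arr.append(tok)
--
--     if substring_arr:
--         all_dedents = True
--         for t in substring_arr:
--             if t != spl_tokens[DEDENT].lower():
--                 all_dedents = False
--
--         last_part = " ".join(substring_arr)
--         if all_dedents:
--             logical_lines[-1] = logical_lines[-1] + " " + last_part
--         else:
--             logical_lines.append(last_part)
--
--     return logical_lines
-- ===== SOURCE B (Python) =====
-- def divide_code_in_logical_lines(s):
--     # Index-based segmentation: find all '__newline__' positions first, then cut the
--     # line for each boundary out of s by slicing (truncate the slice to 255 if longer
--     # than 256, then absorb an '__indent__' standing right after the boundary).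
--     n = len(s)
--     newline_positions = [i for i, t in enumerate(s) if t == "__newline__"]
--     lines = []
--     start = 0
--     for nl in newline_positions:
--         seg = s[start:nl]
--         if len(seg) > 256:
--             seg = seg[:255]
--         if nl + 1 < n and s[nl + 1] == "__indent__":
--             seg = seg + [s[nl + 1]]
--             start = nl + 2
--         else:
--             start = nl + 1
--         lines.append(" ".join(seg).strip())
--     tail = s[start:]
--     if tail:
--         joined = " ".join(tail)
--         if all(t == "__dedent__" for t in tail) and lines:
--             lines[-1] += " " + joined
--         else:
--             lines.append(joined)
--     return lines
-- ===== Notes on version B (the rewrite author's own statement) =====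
-- stated objective: alternative
-- what changed: Replaces A's single accumulating pass (flag-driven token buffer substring_arr) by index-based segmentation: one comprehension collects all '__newline__' positions, then a loop over those positions cuts each line directly out of s by slicing (truncating the slice, absorbing a following '__indent__'), and the tail is a final slice; no token accumulator or lookahead flag exists.
-- crash fix: On a non-empty input consisting only of '__dedent__' tokens A raises IndexError (it appends the trailing dedents to a previous line that does not exist); B returns them joined as a single line. — e.g. on divide_code_in_logical_lines(["__dedent__", "__dedent__"]): A raises IndexError, B returns ["__dedent__ __dedent__"]
import Mathlib
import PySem

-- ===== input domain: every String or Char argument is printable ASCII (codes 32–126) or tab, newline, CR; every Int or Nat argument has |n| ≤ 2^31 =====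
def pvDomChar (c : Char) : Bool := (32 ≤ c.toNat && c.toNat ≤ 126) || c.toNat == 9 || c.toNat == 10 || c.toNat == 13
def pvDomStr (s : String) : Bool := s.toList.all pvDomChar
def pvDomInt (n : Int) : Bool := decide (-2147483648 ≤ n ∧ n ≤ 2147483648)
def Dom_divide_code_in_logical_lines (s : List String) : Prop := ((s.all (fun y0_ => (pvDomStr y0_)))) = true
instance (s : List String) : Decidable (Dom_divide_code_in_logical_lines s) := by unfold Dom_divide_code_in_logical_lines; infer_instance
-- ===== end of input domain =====

-- B replaces A's flag-driven accumulating pass by index-based segmentation (collect all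
-- '__newline__' positions, then cut each line out of s by slicing); same cost, and B returns a
-- value where A raises IndexError (non-empty all-'__dedent__' input).


-- ===== PORT A =====
-- " ".join(arr).rstrip().lstrip()  (A applies rstrip, then lstrip)
def pvJoinStripA (arr : List String) : String :=
  PySem.Str.lstrip (PySem.Str.rstrip (PySem.Str.join " " arr))

-- the body of A's `for idx, tok in enumerate(s)` loop; state = (logical_lines, substring_arr, next_token_is_indent)
def pvStepA (s : List String) (st : List String × List String × Bool) (p : Int × String) :
    List String × List String × Bool :=
  let (logical_lines, substring_arr, next_token_is_indent) := st
  let (idx, tok) := p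
  if next_token_is_indent then
    (logical_lines ++ [pvJoinStripA (substring_arr ++ [tok])], [], false)
  else if tok = "__newline__" then
    let arr := if (substring_arr.length : Int) > 256
               then PySem.List.slice substring_arr none (some 255) else substring_arr
    if idx + 1 < (s.length : Int) ∧ PySem.List.pyGetD s (idx + 1) "" = "__indent__" then
      (logical_lines, arr, true)
    else
      (logical_lines ++ [pvJoinStripA arr], [], false)
  else
    (logical_lines, substring_arr ++ [tok], false)

def divide_code_in_logical_lines (s : List String) : List String :=
  let st := (PySem.List.enumerate s).foldl (pvStepA s) ([], [], false)
  let logical_lines := st.1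
  let substring_arr := st.2.1
  if substring_arr ≠ [] then
    let all_dedents := substring_arr.foldl (fun b t => if t ≠ "__dedent__" then false else b) true
    let last_part := PySem.Str.join " " substring_arr
    if all_dedents then
      match logical_lines.getLast? with
      | some last => logical_lines.dropLast ++ [last ++ " " ++ last_part]
      | none => []  -- Python raises IndexError here; excluded by Pre_
    else logical_lines ++ [last_part]
  else logical_lines

-- ===== PORT B =====
-- " ".join(g).strip()
def pvJoinStrip (g : List String) : String :=
  PySem.Str.strip (PySem.Str.join " " g)

-- [i for i, t in enumerate(s) if t == "__newline__"]
def pvNewlineIdxs (s : List String) : List Int :=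
  (PySem.List.enumerate s).filterMap (fun p => if p.2 = "__newline__" then some p.1 else none)

-- body of Source B's `for nl in newline_positions` loop; state = (lines, start)
def pvStepB (s : List String) (st : List String × Int) (nl : Int) : List String × Int :=
  let (lines, start) := st
  let seg := PySem.List.slice s (some start) (some nl)
  let seg := if (seg.length : Int) > 256 then PySem.List.slice seg none (some 255) else seg
  if nl + 1 < (s.length : Int) ∧ PySem.List.pyGetD s (nl + 1) "" = "__indent__" then
    (lines ++ [pvJoinStrip (seg ++ [PySem.List.pyGetD s (nl + 1) ""])], nl + 2)
  else
    (lines ++ [pvJoinStrip seg], nl + 1)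

def divide_code_in_logical_lines_alt (s : List String) : List String :=
  let st := (pvNewlineIdxs s).foldl (pvStepB s) ([], 0)
  let lines := st.1
  let tail := PySem.List.slice s (some st.2) none
  if tail ≠ [] then
    let joined := PySem.Str.join " " tail
    if tail.all (fun t => t == "__dedent__") ∧ lines ≠ [] then
      lines.dropLast ++ [lines.getLast! ++ " " ++ joined]
    else lines ++ [joined]
  else lines

-- ===== PRECONDITION & SPEC =====
-- Pre_ excludes exactly the inputs on which A raises IndexError: a non-empty list of only
-- '__dedent__' tokens (no line exists for the trailing dedents to be appended to).
def Pre_divide_code_in_logical_lines (s : List String) : Prop :=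
  s = [] ∨ ∃ t ∈ s, t ≠ "__dedent__"
instance (s : List String) : Decidable (Pre_divide_code_in_logical_lines s) := by
  unfold Pre_divide_code_in_logical_lines; infer_instance

def pvWitness_divide_code_in_logical_lines : List String := ["a", "__newline__"]

-- On a non-empty input consisting only of '__dedent__' tokens A raises IndexError; B returns them joined as one line.
def Raises_divide_code_in_logical_lines (s : List String) : Prop :=
  s ≠ [] ∧ ∀ t ∈ s, t = "__dedent__"
instance (s : List String) : Decidable (Raises_divide_code_in_logical_lines s) := by
  unfold Raises_divide_code_in_logical_lines; infer_instance
def pvRaiseWitness_divide_code_in_logical_lines : List String := ["__dedent__", "__dedent__"]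
def pvRaiseWitnessOut_divide_code_in_logical_lines : List String := ["__dedent__ __dedent__"]

def Spec_divide_code_in_logical_lines (s : List String) (out : List String) : Prop :=
  out = divide_code_in_logical_lines_alt s
instance (s : List String) (out : List String) : Decidable (Spec_divide_code_in_logical_lines s out) := by
  unfold Spec_divide_code_in_logical_lines; infer_instance

-- ===== CLAIM (what is proved, stated in full; the proofs are below) =====
def Claim_equal_divide_code_in_logical_lines : Prop :=
  ∀ (s : List String), Dom_divide_code_in_logical_lines s →
    Pre_divide_code_in_logical_lines s →
    Spec_divide_code_in_logical_lines s (divide_code_in_logical_lines s)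

def Claim_raises_divide_code_in_logical_lines : Prop :=
  (∀ (s : List String), Dom_divide_code_in_logical_lines s →
      Raises_divide_code_in_logical_lines s → ¬ Pre_divide_code_in_logical_lines s) ∧
  (Dom_divide_code_in_logical_lines (pvRaiseWitness_divide_code_in_logical_lines) ∧
   Raises_divide_code_in_logical_lines (pvRaiseWitness_divide_code_in_logical_lines) ∧
   divide_code_in_logical_lines_alt (pvRaiseWitness_divide_code_in_logical_lines) =
     pvRaiseWitnessOut_divide_code_in_logical_lines)

-- ===== LEMMAS AND PROOFS =====

-- proof-internal segmentation: (closed groups, trailing tokens); both ports' loops compute it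
def pvGroups : List String → List String → List (List String) × List String
  | [], cur => ([], cur)
  | tok :: rest, cur =>
    if tok = "__newline__" then
      let cur' := if (cur.length : Int) > 256 then PySem.List.slice cur none (some 255) else cur
      match rest with
      | [] => ([cur'], [])
      | ind :: rest' =>
        if ind = "__indent__" then
          let r := pvGroups rest' []
          ((cur' ++ [ind]) :: r.1, r.2)
        else
          let r := pvGroups (ind :: rest') []
          (cur' :: r.1, r.2)
    else
      pvGroups rest (cur ++ [tok])
termination_by structural l => l

-- dropWhile from the left commutes with rdropWhile from the right
lemma pv_rdropWhile_dropWhile_comm {α : Type} (p : α → Bool) (l : List α) :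
    List.rdropWhile p (List.dropWhile p l) = List.dropWhile p (List.rdropWhile p l) := by
  induction l using List.reverseRecOn with
  | nil => simp
  | append_singleton l' x ih =>
    rw [List.dropWhile_append, List.rdropWhile_concat]
    by_cases he : (List.dropWhile p l').isEmpty
    · have hnil : List.dropWhile p l' = [] := List.isEmpty_iff.mp he
      by_cases hx : p x = true
      · simp [hx, hnil, List.dropWhile, ← ih]
      · simp [hx, hnil, List.dropWhile, List.dropWhile_append, List.rdropWhile_singleton]
    · by_cases hx : p x = true
      · simp [he, hx, ih]
      · simp [he, hx, List.dropWhile_append]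

-- branch equations for pvGroups
lemma pvGroups_e1 (cur : List String) : pvGroups [] cur = ([], cur) := rfl
lemma pvGroups_e2 (cur : List String) :
    pvGroups ["__newline__"] cur
      = ([if (cur.length : Int) > 256 then PySem.List.slice cur none (some 255) else cur], []) := rfl
lemma pvGroups_e3 (cur rest' : List String) :
    pvGroups ("__newline__" :: "__indent__" :: rest') cur
      = (((if (cur.length : Int) > 256 then PySem.List.slice cur none (some 255) else cur) ++ ["__indent__"])
           :: (pvGroups rest' []).1, (pvGroups rest' []).2) := rfl
lemma pvGroups_e4 (cur : List String) (ind : String) (rest' : List String) (h : ind ≠ "__indent__") :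
    pvGroups ("__newline__" :: ind :: rest') cur
      = ((if (cur.length : Int) > 256 then PySem.List.slice cur none (some 255) else cur)
           :: (pvGroups (ind :: rest') []).1, (pvGroups (ind :: rest') []).2) := by
  rw [pvGroups.eq_def]; simp [h]
lemma pvGroups_e5 (tok : String) (rest cur : List String) (h : tok ≠ "__newline__") :
    pvGroups (tok :: rest) cur = pvGroups rest (cur ++ [tok]) := by
  rw [pvGroups.eq_def]; simp [h]
lemma pv_len_cast (pre : List String) (x : String) :
    (((pre ++ [x]).length : Nat) : Int) = (pre.length : Int) + 1 := by
  simp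

lemma pvFoldA (s : List String) (suf cur : List String) :
    ∀ (pre lines : List String), s = pre ++ suf →
    (PySem.List.enumerate suf (pre.length : Int)).foldl (pvStepA s) (lines, cur, false)
      = (lines ++ ((pvGroups suf cur).1.map pvJoinStripA), (pvGroups suf cur).2, false) := by
  induction suf, cur using pvGroups.induct with
  | case1 cur =>
    intro pre lines h
    simp [pvGroups_e1, PySem.List.enumerate_nil]
  | case2 cur =>
    intro pre lines h
    have hnc : ¬(((pre.length : Int) + 1 < (s.length : Int)) ∧
        PySem.List.pyGetD s ((pre.length : Int) + 1) "" = "__indent__") := by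
      subst h
      intro ⟨h1, _⟩
      simp at h1
    simp [PySem.List.enumerate_cons, PySem.List.enumerate_nil, pvStepA, hnc, pvGroups_e2]
  | case3 cur rest' ih =>
    intro pre lines h
    have h1 : ((pre.length : Int) + 1 < (s.length : Int)) := by
      subst h; simp
    have h2 : PySem.List.pyGetD s ((pre.length : Int) + 1) "" = "__indent__" := by
      subst h
      rw [show ((pre.length : Int) + 1) = (((pre.length + 1 : Nat)) : Int) by push_cast; ring]
      rw [PySem.List.pyGetD_natCast]
      rw [List.getD_append_right _ _ _ _ (by omega)]
      simp
    have ih' := ih (pre ++ ["__newline__", "__indent__"]) (lines ++ [pvJoinStripA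
      ((if (cur.length : Int) > 256 then PySem.List.slice cur none (some 255) else cur) ++ ["__indent__"])])
      (by simp [h])
    simp only [List.length_append, List.length_cons, List.length_nil] at ih'
    push_cast at ih'
    simp only [gt_iff_lt] at ih'
    simp [PySem.List.enumerate_cons, pvStepA, h1, h2, pvGroups_e3]
    rw [show (pre.length : Int) + 1 + 1 = (pre.length : Int) + 2 by ring]
    simpa using ih'
  | case4 cur ind rest' hind ih =>
    intro pre lines h
    have h2 : PySem.List.pyGetD s ((pre.length : Int) + 1) "" = ind := by
      subst h
      rw [show ((pre.length : Int) + 1) = (((pre.length + 1 : Nat)) : Int) by push_cast; ring]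
      rw [PySem.List.pyGetD_natCast]
      rw [List.getD_append_right _ _ _ _ (by omega)]
      simp
    have hnc : ¬(((pre.length : Int) + 1 < (s.length : Int)) ∧
        PySem.List.pyGetD s ((pre.length : Int) + 1) "" = "__indent__") := by
      intro ⟨_, hx⟩
      rw [h2] at hx
      exact hind hx
    have ih' := ih (pre ++ ["__newline__"]) (lines ++ [pvJoinStripA
      (if (cur.length : Int) > 256 then PySem.List.slice cur none (some 255) else cur)]) (by simp [h])
    rw [pv_len_cast] at ih'
    rw [PySem.List.enumerate_cons, List.foldl_cons]
    rw [show pvStepA s (lines, cur, false) ((pre.length : Int), "__newline__")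
          = (lines ++ [pvJoinStripA
              (if (cur.length : Int) > 256 then PySem.List.slice cur none (some 255) else cur)], [], false) by
      simp [pvStepA, hnc]]
    rw [pvGroups_e4 _ _ _ hind, ih']
    simp
  | case5 tok rest cur htok ih =>
    intro pre lines h
    have ih' := ih (pre ++ [tok]) lines (by simp [h])
    rw [pv_len_cast] at ih'
    rw [PySem.List.enumerate_cons, List.foldl_cons]
    rw [show pvStepA s (lines, cur, false) ((pre.length : Int), tok)
          = (lines, cur ++ [tok], false) by simp [pvStepA, htok]]
    rw [pvGroups_e5 _ _ _ htok, ih']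

lemma pvJoinStripA_eq (arr : List String) : pvJoinStripA arr = pvJoinStrip arr := by
  unfold pvJoinStripA pvJoinStrip
  have h := pv_rdropWhile_dropWhile_comm PySem.Chars.isspace
    (PySem.Chars.join [' '] (arr.map String.toList))
  simp only [List.rdropWhile] at h
  simp [PySem.Str.strip, PySem.Str.lstrip, PySem.Str.rstrip, PySem.Chars.strip,
    PySem.Chars.lstrip, PySem.Chars.rstrip, h]

lemma pv_foldl_all (l : List String) (b : Bool) :
    l.foldl (fun b t => if t ≠ "__dedent__" then false else b) b
      = (b && l.all (fun t => t == "__dedent__")) := by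
  induction l generalizing b with
  | nil => simp
  | cons t l ih =>
    rw [List.foldl_cons, ih]
    by_cases h : t = "__dedent__" <;> simp [h]

lemma pvGroups_nil_fst : ∀ (l cur : List String),
    (pvGroups l cur).1 = [] → (pvGroups l cur).2 = cur ++ l := by
  intro l cur
  induction l, cur using pvGroups.induct with
  | case1 cur => intro _; simp [pvGroups_e1]
  | case2 cur => intro h; simp [pvGroups_e2] at h
  | case3 cur rest' ih => intro h; simp [pvGroups_e3] at h
  | case4 cur ind rest' hind ih => intro h; rw [pvGroups_e4 _ _ _ hind] at h; simp at h
  | case5 tok rest cur htok ih =>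
    intro h
    rw [pvGroups_e5 _ _ _ htok] at h ⊢
    rw [ih h]
    simp

-- the trailing-token list is a suffix of the input
lemma pvGroups_suffix : ∀ (l cur : List String), (pvGroups l cur).2 <:+ cur ++ l := by
  intro l cur
  induction l, cur using pvGroups.induct with
  | case1 cur => simp [pvGroups_e1]
  | case2 cur => simp [pvGroups_e2]
  | case3 cur rest' ih =>
    rw [pvGroups_e3]
    exact ih.trans ⟨cur ++ ["__newline__", "__indent__"], by simp⟩
  | case4 cur ind rest' hind ih =>
    rw [pvGroups_e4 _ _ _ hind]
    exact ih.trans ⟨cur ++ ["__newline__"], by simp⟩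
  | case5 tok rest cur htok ih =>
    rw [pvGroups_e5 _ _ _ htok]
    simpa using ih

-- B's fold over the newline positions of the suffix computes pvGroups
lemma pvFoldB (s : List String) (suf cur : List String) :
    ∀ (pre0 lines : List String), s = pre0 ++ cur ++ suf →
    ((PySem.List.enumerate suf ((pre0.length : Int) + (cur.length : Int))).filterMap
        (fun p => if p.2 = "__newline__" then some p.1 else none)).foldl
      (pvStepB s) (lines, (pre0.length : Int))
      = (lines ++ (pvGroups suf cur).1.map pvJoinStrip,
         (s.length : Int) - ((pvGroups suf cur).2.length : Int)) := by
  induction suf, cur using pvGroups.induct with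
  | case1 cur =>
    intro pre0 lines h
    subst h
    simp [pvGroups_e1, PySem.List.enumerate_nil]
  | case2 cur =>
    intro pre0 lines h
    have hseg : PySem.List.slice s (some (pre0.length : Int))
        (some ((pre0.length : Int) + (cur.length : Int))) = cur := by
      rw [PySem.List.slice_natCast_add, h]
      simp
    have hnc : ¬((((pre0.length : Int) + (cur.length : Int)) + 1 < (s.length : Int)) ∧
        PySem.List.pyGetD s (((pre0.length : Int) + (cur.length : Int)) + 1) "" = "__indent__") := by
      subst h
      intro ⟨h1, _⟩
      simp at h1
      omega
    have hstep : pvStepB s (lines, (pre0.length : Int)) ((pre0.length : Int) + (cur.length : Int))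
        = (lines ++ [pvJoinStrip
            (if (cur.length : Int) > 256 then PySem.List.slice cur none (some 255) else cur)],
           ((pre0.length : Int) + (cur.length : Int)) + 1) := by
      simp only [pvStepB]
      rw [hseg, if_neg hnc]
    have hred : ((PySem.List.enumerate ["__newline__"] ((pre0.length : Int) + (cur.length : Int))).filterMap
        (fun p => if p.2 = "__newline__" then some p.1 else none))
        = [(pre0.length : Int) + (cur.length : Int)] := by
      simp [PySem.List.enumerate_cons, PySem.List.enumerate_nil]
    rw [hred, List.foldl_cons, List.foldl_nil, hstep, pvGroups_e2]
    subst h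
    simp
    ring
  | case3 cur rest' ih =>
    intro pre0 lines h
    have hseg : PySem.List.slice s (some (pre0.length : Int))
        (some ((pre0.length : Int) + (cur.length : Int))) = cur := by
      rw [PySem.List.slice_natCast_add, h]
      simp
    have h1 : (((pre0.length : Int) + (cur.length : Int)) + 1 < (s.length : Int)) := by
      subst h
      simp
      omega
    have h2 : PySem.List.pyGetD s (((pre0.length : Int) + (cur.length : Int)) + 1) "" = "__indent__" := by
      subst h
      rw [show (((pre0.length : Int) + (cur.length : Int)) + 1)
            = (((pre0.length + cur.length + 1 : Nat)) : Int) by push_cast; ring]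
      rw [PySem.List.pyGetD_natCast]
      rw [show pre0 ++ cur ++ ("__newline__" :: "__indent__" :: rest')
            = (pre0 ++ cur ++ ["__newline__"]) ++ ("__indent__" :: rest') by simp]
      rw [List.getD_append_right _ _ _ _
        (by simp only [List.length_append, List.length_cons, List.length_nil]; omega)]
      simp
    have hstep : pvStepB s (lines, (pre0.length : Int)) ((pre0.length : Int) + (cur.length : Int))
        = (lines ++ [pvJoinStrip
            ((if (cur.length : Int) > 256 then PySem.List.slice cur none (some 255) else cur)
              ++ ["__indent__"])],
           ((pre0.length : Int) + (cur.length : Int)) + 2) := by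
      simp only [pvStepB]
      rw [hseg, if_pos ⟨h1, h2⟩, h2]
    have hred : ((PySem.List.enumerate ("__newline__" :: "__indent__" :: rest')
          ((pre0.length : Int) + (cur.length : Int))).filterMap
        (fun p => if p.2 = "__newline__" then some p.1 else none))
        = ((pre0.length : Int) + (cur.length : Int)) ::
            ((PySem.List.enumerate rest' (((pre0.length : Int) + (cur.length : Int)) + 1 + 1)).filterMap
              (fun p => if p.2 = "__newline__" then some p.1 else none)) := by
      simp [PySem.List.enumerate_cons]
    have ih' := ih (pre0 ++ cur ++ ["__newline__", "__indent__"])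
      (lines ++ [pvJoinStrip
        ((if (cur.length : Int) > 256 then PySem.List.slice cur none (some 255) else cur)
          ++ ["__indent__"])])
      (by simp [h])
    have hlen : ((pre0 ++ cur ++ ["__newline__", "__indent__"]).length : Int)
        = ((pre0.length : Int) + (cur.length : Int)) + 2 := by
      simp
      ring
    rw [hlen] at ih'
    rw [hred, List.foldl_cons, hstep, pvGroups_e3]
    rw [show (((pre0.length : Int) + (cur.length : Int)) + 1 + 1)
          = (((pre0.length : Int) + (cur.length : Int)) + 2) by ring]
    rw [show ((((pre0.length : Int) + (cur.length : Int)) + 2) + (([] : List String).length : Int))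
          = (((pre0.length : Int) + (cur.length : Int)) + 2) by simp] at ih'
    rw [ih']
    simp
  | case4 cur ind rest' hind ih =>
    intro pre0 lines h
    have hseg : PySem.List.slice s (some (pre0.length : Int))
        (some ((pre0.length : Int) + (cur.length : Int))) = cur := by
      rw [PySem.List.slice_natCast_add, h]
      simp
    have h2 : PySem.List.pyGetD s (((pre0.length : Int) + (cur.length : Int)) + 1) "" = ind := by
      subst h
      rw [show (((pre0.length : Int) + (cur.length : Int)) + 1)
            = (((pre0.length + cur.length + 1 : Nat)) : Int) by push_cast; ring]
      rw [PySem.List.pyGetD_natCast]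
      rw [show pre0 ++ cur ++ ("__newline__" :: ind :: rest')
            = (pre0 ++ cur ++ ["__newline__"]) ++ (ind :: rest') by simp]
      rw [List.getD_append_right _ _ _ _
        (by simp only [List.length_append, List.length_cons, List.length_nil]; omega)]
      simp
    have hnc : ¬((((pre0.length : Int) + (cur.length : Int)) + 1 < (s.length : Int)) ∧
        PySem.List.pyGetD s (((pre0.length : Int) + (cur.length : Int)) + 1) "" = "__indent__") := by
      intro ⟨_, hx⟩
      rw [h2] at hx
      exact hind hx
    have hstep : pvStepB s (lines, (pre0.length : Int)) ((pre0.length : Int) + (cur.length : Int))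
        = (lines ++ [pvJoinStrip
            (if (cur.length : Int) > 256 then PySem.List.slice cur none (some 255) else cur)],
           ((pre0.length : Int) + (cur.length : Int)) + 1) := by
      simp only [pvStepB]
      rw [hseg, if_neg hnc]
    have hred : ((PySem.List.enumerate ("__newline__" :: ind :: rest')
          ((pre0.length : Int) + (cur.length : Int))).filterMap
        (fun p => if p.2 = "__newline__" then some p.1 else none))
        = ((pre0.length : Int) + (cur.length : Int)) ::
            ((PySem.List.enumerate (ind :: rest') (((pre0.length : Int) + (cur.length : Int)) + 1)).filterMap
              (fun p => if p.2 = "__newline__" then some p.1 else none)) := by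
      simp [PySem.List.enumerate_cons]
    have ih' := ih (pre0 ++ cur ++ ["__newline__"]) (lines ++ [pvJoinStrip
      (if (cur.length : Int) > 256 then PySem.List.slice cur none (some 255) else cur)])
      (by simp [h])
    have hlen : ((pre0 ++ cur ++ ["__newline__"]).length : Int)
        = ((pre0.length : Int) + (cur.length : Int)) + 1 := by
      simp
      ring
    rw [hlen] at ih'
    rw [show ((((pre0.length : Int) + (cur.length : Int)) + 1) + (([] : List String).length : Int))
          = (((pre0.length : Int) + (cur.length : Int)) + 1) by simp] at ih'
    rw [hred, List.foldl_cons, hstep, pvGroups_e4 _ _ _ hind, ih']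
    simp
  | case5 tok rest cur htok ih =>
    intro pre0 lines h
    have hred : ((PySem.List.enumerate (tok :: rest)
          ((pre0.length : Int) + (cur.length : Int))).filterMap
        (fun p => if p.2 = "__newline__" then some p.1 else none))
        = ((PySem.List.enumerate rest (((pre0.length : Int) + (cur.length : Int)) + 1)).filterMap
            (fun p => if p.2 = "__newline__" then some p.1 else none)) := by
      simp [PySem.List.enumerate_cons, htok]
    have ih' := ih pre0 lines (by simp [h])
    rw [show ((pre0.length : Int) + ((cur ++ [tok]).length : Int))
          = (((pre0.length : Int) + (cur.length : Int)) + 1) by simp; ring] at ih'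
    rw [hred, pvGroups_e5 _ _ _ htok, ih']

theorem divide_code_in_logical_lines_raises : Claim_raises_divide_code_in_logical_lines := by
  unfold Claim_raises_divide_code_in_logical_lines
  constructor
  · rintro s _ ⟨hne, hall⟩ (rfl | ⟨t, ht, hne'⟩)
    · exact hne rfl
    · exact hne' (hall t ht)
  · exact ⟨by decide, by decide, by decide⟩

theorem divide_code_in_logical_lines_spec : Claim_equal_divide_code_in_logical_lines := by
  intro s hdom hpre
  unfold Spec_divide_code_in_logical_lines
  have hfoldA := pvFoldA s s [] [] [] (by simp)
  simp only [List.length_nil, Nat.cast_zero, List.nil_append] at hfoldA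
  have hfoldB := pvFoldB s s [] [] [] (by simp)
  simp only [List.length_nil, Nat.cast_zero, Int.add_zero, List.nil_append] at hfoldB
  have hmap : (pvGroups s []).1.map pvJoinStripA = (pvGroups s []).1.map pvJoinStrip :=
    List.map_congr_left (fun a _ => pvJoinStripA_eq a)
  -- B's tail slice is exactly the trailing-token list
  obtain ⟨t, ht⟩ := pvGroups_suffix s []
  simp only [List.nil_append] at ht
  have hslen : t.length + (pvGroups s []).2.length = s.length := by
    have := congrArg List.length ht
    simpa using this
  have hlen' : (pvGroups s []).2.length ≤ s.length := by omega
  have htail : PySem.List.slice s (some ((s.length : Int) - ((pvGroups s []).2.length : Int))) none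
      = (pvGroups s []).2 := by
    rw [← Nat.cast_sub hlen', PySem.List.slice_from_natCast]
    rw [show s.length - (pvGroups s []).2.length = t.length by omega]
    conv_lhs => rw [← ht]
    exact List.drop_left
  simp only [divide_code_in_logical_lines, divide_code_in_logical_lines_alt,
    pvNewlineIdxs, hfoldA, hfoldB, hmap, htail]
  by_cases hcne : (pvGroups s []).2 = []
  · simp [hcne]
  · simp only [hcne, ne_eq, not_false_iff, if_true]
    rw [pv_foldl_all]
    simp only [Bool.true_and]
    by_cases hall : (pvGroups s []).2.all (fun t => t == "__dedent__")
    · simp only [hall, if_true]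
      cases hl : ((pvGroups s []).1.map pvJoinStrip).getLast? with
      | some last =>
        have hne : (pvGroups s []).1.map pvJoinStrip ≠ [] := by
          intro hx; rw [hx] at hl; simp at hl
        obtain ⟨l', hl'⟩ := List.getLast?_eq_some_iff.mp hl
        simp only [hne, true_and]
        rw [hl']
        simp
      | none =>
        exfalso
        have h1 : (pvGroups s []).1 = [] := by
          have := List.getLast?_eq_none_iff.mp hl
          simpa using this
        have h2 := pvGroups_nil_fst s [] h1
        simp only [List.nil_append] at h2
        apply (divide_code_in_logical_lines_raises.1 s hdom ⟨?_, ?_⟩) hpre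
        · rw [← h2]; exact hcne
        · intro t ht
          rw [h2] at hall
          have := List.all_eq_true.mp hall t ht
          simpa using this
    · simp [hall]
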